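-- pv_equiv track=rewrite | github.com/madhaligaze/scaffold-brain | scaffold/validators.py | access_rules
-- ===== SOURCE A (Python) =====
-- from typing import Any, Iterable
--
-- def _type(e: dict[str, Any]) -> str:
--     return str(e.get("type") or e.get("kind") or "unknown")
--
-- def access_rules(elements: list[dict[str, Any]], policy) -> tuple[bool, list[dict[str, Any]]]:
--     del policy
--     violations: list[dict[str, Any]] = []
--     decks = [e for e in elements if _type(e) == "deck"]
--     access = [e for e in elements if _type(e) in ("stair", "ladder")]
--
--     if decks and not access:
--         violations.append({"type": "ACCESS_MISSING_STAIRS", "msg": "Deck exists but no stair/ladder element present"})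
--
--     return len(violations) == 0, violations
-- ===== SOURCE B (Python) =====
-- from typing import Any
--
-- def _type(e: dict[str, Any]) -> str:
--     return str(e.get("type") or e.get("kind") or "unknown")
--
-- def access_rules(elements: list[dict[str, Any]], policy) -> tuple[bool, list[dict[str, Any]]]:
--     del policy
--     has_deck = False
--     has_access = False
--     for e in elements:
--         t = _type(e)
--         if t == "deck":
--             has_deck = True
--         elif t in ("stair", "ladder"):
--             has_access = True
--         if has_deck and has_access:
--             break
--     violations: list[dict[str, Any]] = []
--     if has_deck and not has_access:
--         violations.append({"type": "ACCESS_MISSING_STAIRS", "msg": "Deck exists but no stair/ladder element present"})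
--     return len(violations) == 0, violations
-- ===== Notes on version B (the rewrite author's own statement) =====
-- stated objective: alternative
-- what changed: Replaces the two filtered-list comprehensions (which materialise full deck/access lists) with a single pass over elements maintaining two boolean flags, calling _type once per element and breaking early once both flags are set.
import Mathlib
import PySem

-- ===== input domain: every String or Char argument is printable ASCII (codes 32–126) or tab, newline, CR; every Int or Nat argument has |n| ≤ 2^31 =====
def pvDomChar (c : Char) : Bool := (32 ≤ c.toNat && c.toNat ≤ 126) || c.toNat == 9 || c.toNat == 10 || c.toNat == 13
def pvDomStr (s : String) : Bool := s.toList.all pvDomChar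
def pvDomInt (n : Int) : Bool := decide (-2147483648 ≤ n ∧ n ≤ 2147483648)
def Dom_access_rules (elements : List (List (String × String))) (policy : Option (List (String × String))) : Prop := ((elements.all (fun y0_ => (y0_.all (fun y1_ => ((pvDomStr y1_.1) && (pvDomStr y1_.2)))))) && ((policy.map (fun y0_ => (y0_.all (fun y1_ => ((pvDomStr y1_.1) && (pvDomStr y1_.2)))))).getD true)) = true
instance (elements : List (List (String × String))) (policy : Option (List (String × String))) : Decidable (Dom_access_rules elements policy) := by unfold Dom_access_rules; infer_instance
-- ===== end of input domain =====

-- B replaces A's two filter comprehensions with one pass over `elements` maintaining two booleans (early exit once both are set); same result, O(1) extra space (objective: alternative).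


-- ===== PORT A =====
-- _type(e): e.get("type") or e.get("kind") or "unknown"  (Python `or`: empty string is falsy)
def pyOrStr (o : Option String) (d : String) : String :=
  match o with
  | some s => if s = "" then d else s
  | none => d

def pytype (e : List (String × String)) : String :=
  pyOrStr ((PySem.Dict.mk e).get? "type") (pyOrStr ((PySem.Dict.mk e).get? "kind") "unknown")

def pvViolation : List (String × String) :=
  [("type", "ACCESS_MISSING_STAIRS"), ("msg", "Deck exists but no stair/ladder element present")]

def access_rules (elements : List (List (String × String))) (policy : Option (List (String × String))) : Bool × (List (List (String × String))) :=
  let _ := policy  -- del policy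
  let violations : List (List (String × String)) := []
  let decks := elements.filter (fun e => pytype e = "deck")
  let access := elements.filter (fun e => pytype e = "stair" ∨ pytype e = "ladder")
  let violations := if decks ≠ [] ∧ access = [] then violations ++ [pvViolation] else violations
  (violations.length == 0, violations)

-- ===== PORT B =====
-- single pass maintaining (has_deck, has_access), breaking early once both are true
def scanFlags : List (List (String × String)) → Bool → Bool → Bool × Bool
  | [], hasDeck, hasAccess => (hasDeck, hasAccess)
  | e :: rest, hasDeck, hasAccess =>
    let t := pytype e
    let p := if t = "deck" then (true, hasAccess)
             else if t = "stair" ∨ t = "ladder" then (hasDeck, true)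
             else (hasDeck, hasAccess)
    if p.1 && p.2 then p else scanFlags rest p.1 p.2

def access_rules_alt (elements : List (List (String × String))) (policy : Option (List (String × String))) : Bool × (List (List (String × String))) :=
  let _ := policy  -- del policy
  let p := scanFlags elements false false
  let violations : List (List (String × String)) :=
    if p.1 && !p.2 then [pvViolation] else []
  (violations.length == 0, violations)

-- ===== PRECONDITION & SPEC =====
def Spec_access_rules (elements : List (List (String × String))) (policy : Option (List (String × String))) (out : Bool × (List (List (String × String)))) : Prop := out = access_rules_alt elements policy
instance (elements : List (List (String × String))) (policy : Option (List (String × String))) (out : Bool × (List (List (String × String)))) : Decidable (Spec_access_rules elements policy out) := by unfold Spec_access_rules; infer_instance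

-- ===== CLAIM (what is proved, stated in full; the proofs are below) =====
def Claim_equal_access_rules : Prop := ∀ (elements : List (List (String × String))) (policy : Option (List (String × String))), Dom_access_rules elements policy → Spec_access_rules elements policy (access_rules elements policy)

-- ===== LEMMAS AND PROOFS =====

lemma scanFlags_eq (es : List (List (String × String))) (d a : Bool) :
    scanFlags es d a = (d || es.any (fun e => pytype e = "deck"),
                        a || es.any (fun e => decide (pytype e = "stair" ∨ pytype e = "ladder"))) := by
  induction es generalizing d a with
  | nil => simp [scanFlags]
  | cons e rest ih =>
    simp only [scanFlags, List.any_cons]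
    by_cases h1 : pytype e = "deck"
    · by_cases h2 : pytype e = "stair" ∨ pytype e = "ladder"
      · rcases h2 with h2 | h2 <;> rw [h1] at h2 <;> simp at h2
      · simp only [h1]
        cases a with
        | true => simp
        | false => simp [ih, h1]
    · by_cases h2 : pytype e = "stair" ∨ pytype e = "ladder"
      · simp only [if_neg h1, if_pos h2]
        cases d with
        | true => simp [h1, h2]
        | false => simp [ih, h1, h2]
      · cases d <;> cases a <;> simp [ih, h1, h2]

-- ===== VERDICT (by name: the statement is the Claim_ definition above) =====
theorem access_rules_spec : Claim_equal_access_rules := by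
  intro elements policy _
  unfold Spec_access_rules access_rules access_rules_alt
  rw [scanFlags_eq]
  simp only [Bool.false_or]
  by_cases hd : elements.any (fun e => pytype e = "deck")
  · by_cases ha : elements.any (fun e => decide (pytype e = "stair" ∨ pytype e = "ladder"))
    · have h1 : elements.filter (fun e => pytype e = "deck") ≠ [] := by
        simp only [ne_eq, List.filter_eq_nil_iff]; push Not
        obtain ⟨x, hx, hpx⟩ := List.any_eq_true.mp hd
        exact ⟨x, hx, by simpa using hpx⟩
      have h2 : ¬ (List.filter (fun e => decide (pytype e = "stair" ∨ pytype e = "ladder")) elements = []) := by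
        simp only [List.filter_eq_nil_iff]; push Not
        obtain ⟨x, hx, hpx⟩ := List.any_eq_true.mp ha
        exact ⟨x, hx, by simpa using hpx⟩
      simp [hd, h1]
    · have h1 : elements.filter (fun e => pytype e = "deck") ≠ [] := by
        simp only [ne_eq, List.filter_eq_nil_iff]; push Not
        obtain ⟨x, hx, hpx⟩ := List.any_eq_true.mp hd
        exact ⟨x, hx, by simpa using hpx⟩
      have h2 : List.filter (fun e => decide (pytype e = "stair" ∨ pytype e = "ladder")) elements = [] := by
        simp only [List.filter_eq_nil_iff]
        intro x hx
        by_contra hc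
        exact ha (List.any_eq_true.mpr ⟨x, hx, by simpa using hc⟩)
      simp [hd, h1, h2]
  · have h1 : elements.filter (fun e => pytype e = "deck") = [] := by
      simp only [List.filter_eq_nil_iff]
      intro x hx
      by_contra hc
      exact hd (List.any_eq_true.mpr ⟨x, hx, by simpa using hc⟩)
    simp [hd, h1]
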